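-- pv_equiv track=rewrite | github.com/misaka-10032/leetcode | coding/00249-group-shifted-strings/solution.py | _get_repr
-- ===== SOURCE A (Python) =====
-- from typing import List, Optional, Tuple
--
-- def _get_repr(string: str) -> Optional[Tuple[int, ...]]:
--     if not string:
--         return None
--     result = []
--     for i in range(1, len(string)):
--         ord_0 = ord(string[0])
--         ord_i = ord(string[i])
--         result.append((ord_i - ord_0) % 26)
--     return tuple(result)
-- ===== SOURCE B (Python) =====
-- from typing import Optional, Tuple
--
-- def _get_repr(string: str) -> Optional[Tuple[int, ...]]:
--     if not string:
--         return None
--     result = []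
--     prev = ord(string[0])
--     acc = 0
--     for ch in string[1:]:
--         acc += ord(ch) - prev
--         prev = ord(ch)
--         result.append(acc % 26)
--     return tuple(result)
-- ===== Notes on version B (the rewrite author's own statement) =====
-- stated objective: alternative
-- what changed: B makes a single pass over the tail maintaining prev/acc running-difference state (a telescoping prefix sum of consecutive character differences) instead of re-reading the first character and indexing by position on every iteration.
import Mathlib
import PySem

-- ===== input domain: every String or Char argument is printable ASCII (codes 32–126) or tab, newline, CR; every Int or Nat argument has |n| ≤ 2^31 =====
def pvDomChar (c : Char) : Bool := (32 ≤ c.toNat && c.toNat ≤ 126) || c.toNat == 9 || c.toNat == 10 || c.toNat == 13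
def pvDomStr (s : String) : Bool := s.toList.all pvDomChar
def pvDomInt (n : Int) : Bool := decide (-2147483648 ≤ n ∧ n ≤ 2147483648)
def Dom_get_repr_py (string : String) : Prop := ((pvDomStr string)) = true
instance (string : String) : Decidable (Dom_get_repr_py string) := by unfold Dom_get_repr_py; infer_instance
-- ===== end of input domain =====

-- B replaces repeated indexing against string[0] by a single pass with prev/acc running-difference state (alternative decomposition; return value identical).


-- ===== PORT A =====
-- literal transliteration of A: 'for i in range(1, len(string)): result.append((ord(string[i]) - ord(string[0])) % 26)'
def get_repr_py (string : String) : Option (List Int) :=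
  let cs := string.toList
  if cs = [] then none
  else
    some ((PySem.List.pyRange 1 (PySem.List.len cs) 1).foldl
      (fun result i =>
        let ord_0 : Int := (PySem.List.pyGetD cs 0 ' ').toNat
        let ord_i : Int := (PySem.List.pyGetD cs i ' ').toNat
        result ++ [PySem.Int.mod (ord_i - ord_0) 26]) [])

-- ===== PORT B =====
-- one pass over the tail with prev/acc state; emits acc % 26 at each step
def getReprGo (prev : Int) (acc : Int) : List Char → List Int
  | [] => []
  | c :: rest =>
      let acc' := acc + ((c.toNat : Int) - prev)
      PySem.Int.mod acc' 26 :: getReprGo (c.toNat : Int) acc' rest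

def get_repr_py_alt (string : String) : Option (List Int) :=
  match string.toList with
  | [] => none
  | c :: rest => some (getReprGo (c.toNat : Int) 0 rest)

-- ===== PRECONDITION & SPEC =====
def Spec_get_repr_py (string : String) (out : Option (List Int)) : Prop := out = get_repr_py_alt string
instance (string : String) (out : Option (List Int)) : Decidable (Spec_get_repr_py string out) := by unfold Spec_get_repr_py; infer_instance

-- ===== CLAIM (what is proved, stated in full; the proofs are below) =====
def Claim_equal_get_repr_py : Prop := ∀ (string : String), Dom_get_repr_py string → Spec_get_repr_py string (get_repr_py string)

-- ===== LEMMAS AND PROOFS =====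

-- B's accumulator telescopes: when acc = prev - base, each emitted value is (ord c - base) % 26.
theorem getReprGo_eq_map (base : Int) (rest : List Char) :
    ∀ prev acc, acc = prev - base →
      getReprGo prev acc rest = rest.map (fun c => PySem.Int.mod ((c.toNat : Int) - base) 26) := by
  induction rest with
  | nil => intro _ _ _; rfl
  | cons c rest ih =>
      intro prev acc h
      simp only [getReprGo, List.map]
      have hv : acc + ((c.toNat : Int) - prev) = (c.toNat : Int) - base := by omega
      rw [hv, ih _ _ (by omega)]

theorem get_repr_py_spec : Claim_equal_get_repr_py := by
  intro s _
  unfold Spec_get_repr_py get_repr_py get_repr_py_alt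
  cases hcs : s.toList with
  | nil => simp
  | cons c rest =>
      simp only [if_neg (by simp : ¬ (c :: rest = []))]
      congr 1
      rw [PySem.List.foldl_append_singleton_eq_map
            (fun i => PySem.Int.mod
              (((PySem.List.pyGetD (c :: rest) i ' ').toNat : Int)
               - ((PySem.List.pyGetD (c :: rest) 0 ' ').toNat : Int)) 26)
            (PySem.List.pyRange 1 (PySem.List.len (c :: rest)) 1) [], List.nil_append]
      have hmap :
          (PySem.List.pyRange 1 (PySem.List.len (c :: rest)) 1).map
              (fun i => PySem.Int.mod
                (((PySem.List.pyGetD (c :: rest) i ' ').toNat : Int)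
                 - ((PySem.List.pyGetD (c :: rest) 0 ' ').toNat : Int)) 26)
          = ((PySem.List.pyRange 1 (PySem.List.len (c :: rest)) 1).map
              (fun i => PySem.List.pyGetD (c :: rest) i ' ')).map
              (fun d => PySem.Int.mod
                (((d.toNat : Int))
                 - ((PySem.List.pyGetD (c :: rest) 0 ' ').toNat : Int)) 26) := by
        rw [List.map_map]; rfl
      rw [hmap, PySem.List.map_pyGetD_pyRange (c :: rest) ' ' (by omega : (0:Int) ≤ 1)]
      rw [getReprGo_eq_map (c.toNat : Int) rest _ _ (by omega)]
      simp [PySem.List.pyGetD_zero_cons]
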